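-- pv_equiv track=rewrite | github.com/willtech3/prompt_studio | backend/app/routers/chat/parameters.py | parse_stop_sequences
-- ===== SOURCE A (Python) =====
-- def parse_stop_sequences(stop: str | None) -> list[str] | None:
--     """Parse stop sequences from string input.
--
--     Supports comma and newline separators.
--
--     Args:
--         stop: Stop sequence string
--
--     Returns:
--         List of stop sequences or None
--     """
--     if not stop:
--         return None
--
--     # Split by comma and newline
--     separators = [",", "\n"]
--     parts = [stop]
--     for sep in separators:
--         parts = sum([p.split(sep) for p in parts], [])
--
--     # Clean and filter
--     stop_list = [s.strip() for s in parts if s.strip()]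
--     return stop_list if stop_list else None
-- ===== SOURCE B (Python) =====
-- def parse_stop_sequences(stop: str | None) -> list[str] | None:
--     """Single-pass tokenizer: split on ',' and '\n' while scanning once."""
--     if not stop:
--         return None
--     stop_list = []
--     buf = []
--     for ch in stop:
--         if ch == "," or ch == "\n":
--             tok = "".join(buf).strip()
--             if tok:
--                 stop_list.append(tok)
--             buf = []
--         else:
--             buf.append(ch)
--     tok = "".join(buf).strip()
--     if tok:
--         stop_list.append(tok)
--     return stop_list if stop_list else None
-- ===== Notes on version B (the rewrite author's own statement) =====
-- stated objective: alternative
-- what changed: Replaced the separator loop with its repeated split-and-sum flattening and the two-pass strip/filter by a single left-to-right character scan that accumulates a buffer and flushes a stripped token at each comma or newline.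
import Mathlib
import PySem

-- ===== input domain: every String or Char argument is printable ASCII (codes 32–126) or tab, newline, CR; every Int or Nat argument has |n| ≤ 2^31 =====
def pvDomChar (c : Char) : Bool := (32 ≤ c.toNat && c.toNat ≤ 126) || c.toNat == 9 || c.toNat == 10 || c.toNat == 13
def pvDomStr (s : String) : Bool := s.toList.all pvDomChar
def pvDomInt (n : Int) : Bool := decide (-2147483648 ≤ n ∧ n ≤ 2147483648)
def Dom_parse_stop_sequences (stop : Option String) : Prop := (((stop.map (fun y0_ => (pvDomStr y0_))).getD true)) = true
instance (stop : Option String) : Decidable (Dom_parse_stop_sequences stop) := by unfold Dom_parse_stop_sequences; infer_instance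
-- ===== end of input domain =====

-- B replaces A's separator loop with repeated split-and-flatten by a single
-- left-to-right character scan flushing a stripped token at each comma or newline
-- (alternative decomposition; same return value everywhere).


-- ===== PORT A =====
-- A: if not stop: None; parts = [stop]; for sep in [",","\n"]: parts = sum([p.split(sep) for p in parts], []);
-- stop_list = [s.strip() for s in parts if s.strip()]; return stop_list if stop_list else None
def parse_stop_sequences (stop : Option String) : Option (List String) :=
  match stop with
  | none => none
  | some s =>
    if s.toList = [] then none
    else
      let separators : List (List Char) := [[','], ['\n']]
      let parts : List (List Char) :=
        separators.foldl
          (fun parts sep => (parts.map (fun p => PySem.Chars.splitOn p sep)).flatten)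
          [s.toList]
      let stop_list : List String :=
        parts.filterMap (fun p =>
          let t := PySem.Chars.strip p
          if t = [] then none else some (String.mk t))
      if stop_list = [] then none else some stop_list

-- ===== PORT B =====
-- the scan loop of Source B: buffer of current token; flush (strip, keep if nonempty) at ',' / '\n' and at the end
def pvAltScan : List Char → List Char → List String
  | [], buf =>
    let t := PySem.Chars.strip buf
    if t = [] then [] else [String.mk t]
  | c :: cs, buf =>
    if c = ',' ∨ c = '\n' then
      (let t := PySem.Chars.strip buf
       if t = [] then [] else [String.mk t]) ++ pvAltScan cs []
    else pvAltScan cs (buf ++ [c])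

def parse_stop_sequences_alt (stop : Option String) : Option (List String) :=
  match stop with
  | none => none
  | some s =>
    if s.toList = [] then none
    else
      let stop_list := pvAltScan s.toList []
      if stop_list = [] then none else some stop_list

-- ===== PRECONDITION & SPEC =====
def Spec_parse_stop_sequences (stop : Option String) (out : Option (List String)) : Prop := out = parse_stop_sequences_alt stop
instance (stop : Option String) (out : Option (List String)) : Decidable (Spec_parse_stop_sequences stop out) := by unfold Spec_parse_stop_sequences; infer_instance

-- ===== CLAIM (what is proved, stated in full; the proofs are below) =====
def Claim_equal_parse_stop_sequences : Prop := ∀ (stop : Option String), Dom_parse_stop_sequences stop → Spec_parse_stop_sequences stop (parse_stop_sequences stop)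

-- ===== LEMMAS AND PROOFS =====

-- simple structural recursion computing split-on-one-character
def pvSplit1 (sep : Char) : List Char → List (List Char)
  | [] => [[]]
  | c :: cs => if c = sep then [] :: pvSplit1 sep cs else (pvSplit1 sep cs).modifyHead (c :: ·)

-- split on either separator in one pass
def pvSplitBoth : List Char → List (List Char)
  | [] => [[]]
  | c :: cs => if c = ',' ∨ c = '\n' then [] :: pvSplitBoth cs else (pvSplitBoth cs).modifyHead (c :: ·)

def pvJoinHead (b : List Char) : List (List Char) → List (List Char)
  | [] => [b]
  | h :: t => (b ++ h) :: t

def pvClean (ps : List (List Char)) : List String :=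
  ps.filterMap (fun p =>
    let t := PySem.Chars.strip p
    if t = [] then none else some (String.mk t))

theorem pvSplit1_ne_nil (sep : Char) (l : List Char) : pvSplit1 sep l ≠ [] := by
  cases l with
  | nil => simp [pvSplit1]
  | cons c cs =>
    simp only [pvSplit1]
    split
    · simp
    · cases h : pvSplit1 sep cs with
      | nil => exact absurd h (pvSplit1_ne_nil sep cs)
      | cons a t => simp [List.modifyHead]

theorem pvSplitBoth_ne_nil (l : List Char) : pvSplitBoth l ≠ [] := by
  cases l with
  | nil => simp [pvSplitBoth]
  | cons c cs =>
    simp only [pvSplitBoth]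
    split
    · simp
    · cases h : pvSplitBoth cs with
      | nil => exact absurd h (pvSplitBoth_ne_nil cs)
      | cons a t => simp [List.modifyHead]

theorem pvJoinHead_nil_of_ne (ps : List (List Char)) (h : ps ≠ []) : pvJoinHead [] ps = ps := by
  cases ps with
  | nil => exact absurd rfl h
  | cons a t => simp [pvJoinHead]

-- the fuel-based splitOn.go computes pvSplit1
theorem pvGo_spec (sep : Char) :
    ∀ (fuel : Nat) (l cur : List Char) (acc : List (List Char)), l.length ≤ fuel →
      PySem.Chars.splitOn.go [sep] fuel l cur acc
        = acc.reverse ++ pvJoinHead cur.reverse (pvSplit1 sep l) := by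
  intro fuel
  induction fuel with
  | zero =>
    intro l cur acc hl
    have : l = [] := List.length_eq_zero_iff.mp (Nat.le_zero.mp hl)
    subst this
    simp [PySem.Chars.splitOn.go, pvSplit1, pvJoinHead]
  | succ f ih =>
    intro l cur acc hl
    cases l with
    | nil => simp [PySem.Chars.splitOn.go, pvSplit1, pvJoinHead]
    | cons c rest =>
      have hrest : rest.length ≤ f := by simpa using Nat.succ_le_succ_iff.mp hl
      by_cases hc : c = sep
      · subst hc
        have hpre : List.isPrefixOf [c] (c :: rest) = true := by
          simp [List.isPrefixOf]
        rw [PySem.Chars.splitOn.go]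
        simp only [hpre, if_pos]
        rw [show List.drop (List.length [c]) (c :: rest) = rest by simp]
        rw [ih rest [] (cur.reverse :: acc) hrest]
        rw [List.reverse_nil, pvJoinHead_nil_of_ne _ (pvSplit1_ne_nil c rest)]
        simp [pvSplit1, pvJoinHead]
      · have hpre : List.isPrefixOf [sep] (c :: rest) = false := by
          simp only [List.isPrefixOf, List.isPrefixOf_nil_left, Bool.and_true,
            beq_eq_false_iff_ne, ne_eq]
          exact fun h => hc h.symm
        rw [PySem.Chars.splitOn.go]
        simp only [hpre, Bool.false_eq_true, if_false]
        rw [ih rest (c :: cur) acc hrest]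
        cases h : pvSplit1 sep rest with
        | nil => exact absurd h (pvSplit1_ne_nil sep rest)
        | cons a t => simp [pvSplit1, hc, h, pvJoinHead, List.modifyHead]

theorem pvSplitOn_eq (l : List Char) (sep : Char) :
    PySem.Chars.splitOn l [sep] = pvSplit1 sep l := by
  rw [PySem.Chars.splitOn, pvGo_spec sep (l.length + 1) l [] [] (Nat.le_succ _)]
  rw [show List.reverse ([] : List Char) = [] from rfl]
  simp [pvJoinHead_nil_of_ne _ (pvSplit1_ne_nil sep l)]

-- splitting by ',' then every piece by '\n' is the one-pass split on both
theorem pvSplitBoth_eq (l : List Char) :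
    ((pvSplit1 ',' l).map (pvSplit1 '\n')).flatten = pvSplitBoth l := by
  induction l with
  | nil => simp [pvSplit1, pvSplitBoth]
  | cons c cs ih =>
    by_cases hc : c = ','
    · subst hc
      simp [pvSplit1, pvSplitBoth, ih]
    · cases h : pvSplit1 ',' cs with
      | nil => exact absurd h (pvSplit1_ne_nil ',' cs)
      | cons a t =>
        by_cases hn : c = '\n'
        · subst hn
          simp only [pvSplit1, if_neg hc, h, List.modifyHead, List.map_cons,
            List.flatten_cons, pvSplitBoth, if_pos (Or.inr rfl)]
          rw [← ih, h]
          simp [pvSplit1]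
        · simp only [pvSplit1, if_neg hc, h, List.modifyHead, List.map_cons,
            List.flatten_cons, pvSplitBoth, if_neg (by tauto : ¬(c = ',' ∨ c = '\n'))]
          rw [← ih, h]
          cases h2 : pvSplit1 '\n' a with
          | nil => exact absurd h2 (pvSplit1_ne_nil '\n' a)
          | cons b u => simp [pvSplit1, hn, h2, List.modifyHead]

-- the B scan computes clean-of-split with the pending buffer joined onto the first piece
theorem pvAltScan_eq : ∀ (cs buf : List Char),
    pvAltScan cs buf = pvClean (pvJoinHead buf (pvSplitBoth cs)) := by
  intro cs
  induction cs with
  | nil =>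
    intro buf
    simp only [pvAltScan, pvSplitBoth, pvJoinHead, pvClean, List.filterMap_cons, List.filterMap_nil]
    split <;> simp_all
  | cons c cs ih =>
    intro buf
    by_cases hc : c = ',' ∨ c = '\n'
    · simp only [pvAltScan, if_pos hc, ih]
      rw [pvJoinHead_nil_of_ne _ (pvSplitBoth_ne_nil cs)]
      simp only [pvSplitBoth, if_pos hc, pvJoinHead, List.append_nil, pvClean,
        List.filterMap_cons]
      split <;> simp_all
    · cases h : pvSplitBoth cs with
      | nil => exact absurd h (pvSplitBoth_ne_nil cs)
      | cons a t =>
        simp only [pvAltScan, if_neg hc, pvSplitBoth, h, List.modifyHead, pvJoinHead, ih, h]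
        simp

-- ===== VERDICT (by name: the statement is the Claim_ definition above) =====
theorem parse_stop_sequences_spec : Claim_equal_parse_stop_sequences := by
  intro stop _
  unfold Spec_parse_stop_sequences
  cases stop with
  | none => rfl
  | some s =>
    simp only [parse_stop_sequences, parse_stop_sequences_alt]
    by_cases hs : s.toList = []
    · simp [hs]
    · simp only [hs, List.foldl, List.map, List.flatten]
      have hA : ((([s.toList].map (fun p => PySem.Chars.splitOn p [','])).flatten.map
          (fun p => PySem.Chars.splitOn p ['\n'])).flatten)
          = pvSplitBoth s.toList := by
        simp only [List.map_cons, List.map_nil, List.flatten_cons, List.flatten_nil,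
          List.append_nil, pvSplitOn_eq]
        exact pvSplitBoth_eq s.toList
      have hB : pvAltScan s.toList [] = pvClean (pvSplitBoth s.toList) := by
        rw [pvAltScan_eq, pvJoinHead_nil_of_ne _ (pvSplitBoth_ne_nil s.toList)]
      rw [hB]
      congr 1
      rw [← hA]
      simp [pvClean]
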